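-- pv_equiv track=rewrite | github.com/racerandom/JaMIE | utils.py | sbwner2ner
-- ===== SOURCE A (Python) =====
-- def sbwner2ner(sbw_sent_ner, aligned_ids):
--     sent_ner = []
--     for index, sbw_ner in enumerate(sbw_sent_ner):
--         if index > 0:
--             if aligned_ids[index] != aligned_ids[index - 1]:
--                 sent_ner.append(sbw_ner)
--         else:
--             sent_ner.append(sbw_ner)
--     return sent_ner
-- ===== SOURCE B (Python) =====
-- def sbwner2ner(sbw_sent_ner, aligned_ids):
--     if len(sbw_sent_ner) <= 1:
--         return list(sbw_sent_ner)
--     pairs = list(zip(sbw_sent_ner, aligned_ids))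
--     sent_ner = []
--     i, n = 0, len(pairs)
--     while i < n:
--         tag, gid = pairs[i]
--         sent_ner.append(tag)
--         i += 1
--         while i < n and pairs[i][1] == gid:
--             i += 1
--     return sent_ner
-- ===== Notes on version B (the rewrite author's own statement) =====
-- stated objective: alternative
-- what changed: B zips tags with their aligned ids and run-groups them, emitting the first tag of each maximal run of equal ids, instead of A's indexed loop comparing aligned_ids[i] with aligned_ids[i-1]; lists of at most one tag are returned as-is.
import Mathlib
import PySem

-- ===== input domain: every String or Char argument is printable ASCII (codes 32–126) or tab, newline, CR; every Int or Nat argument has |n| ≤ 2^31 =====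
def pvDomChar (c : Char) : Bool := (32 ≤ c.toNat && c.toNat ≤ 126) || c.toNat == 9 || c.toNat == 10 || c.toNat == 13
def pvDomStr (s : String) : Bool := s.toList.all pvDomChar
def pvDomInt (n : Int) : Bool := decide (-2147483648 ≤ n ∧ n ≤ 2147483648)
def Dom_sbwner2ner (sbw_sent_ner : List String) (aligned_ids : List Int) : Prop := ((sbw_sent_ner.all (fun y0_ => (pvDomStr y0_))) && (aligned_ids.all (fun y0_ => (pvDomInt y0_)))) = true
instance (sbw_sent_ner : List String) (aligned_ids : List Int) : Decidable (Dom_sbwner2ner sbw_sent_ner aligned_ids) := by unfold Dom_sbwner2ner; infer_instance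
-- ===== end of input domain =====

-- B replaces A's compare-to-previous indexed loop by run-grouping over the zipped
-- (tag, id) pairs, taking the first tag of each maximal run of equal ids (objective: alternative).

-- ===== PORT A =====
-- the 'for index, sbw_ner in enumerate(...)' loop; pyGetD is aligned_ids[...] (in range under Pre_)
def sbwner2nerLoopA (al : List Int) : List String → Int → List String → List String
  | [], _, acc => acc
  | sbw_ner :: rest, index, acc =>
      sbwner2nerLoopA al rest (index + 1)
        (if index > 0 then
          (if PySem.List.pyGetD al index 0 ≠ PySem.List.pyGetD al (index - 1) 0 then acc ++ [sbw_ner] else acc)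
        else acc ++ [sbw_ner])

def sbwner2ner (sbw_sent_ner : List String) (aligned_ids : List Int) : List String :=
  sbwner2nerLoopA aligned_ids sbw_sent_ner 0 []

-- ===== PORT B =====
-- outer while: emit first tag of the run; inner while (k advancing past equal ids) + pairs[k:] = dropWhile
def sbwner2nerLoopB : List (String × Int) → List String
  | [] => []
  | (tag, gid) :: rest =>
      tag :: sbwner2nerLoopB (rest.dropWhile (fun p => p.2 == gid))
termination_by l => l.length
decreasing_by
  simpa using Nat.lt_succ_of_le (List.length_dropWhile_le _ _)

def sbwner2ner_alt (sbw_sent_ner : List String) (aligned_ids : List Int) : List String :=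
  if sbw_sent_ner.length ≤ 1 then sbw_sent_ner
  else sbwner2nerLoopB (sbw_sent_ner.zip aligned_ids)

-- ===== PRECONDITION & SPEC =====
-- A raises IndexError when sbw_sent_ner has ≥ 2 elements but aligned_ids is shorter; Pre_ excludes exactly those inputs.
def Pre_sbwner2ner (sbw_sent_ner : List String) (aligned_ids : List Int) : Prop :=
  sbw_sent_ner.length ≤ 1 ∨ sbw_sent_ner.length ≤ aligned_ids.length
instance (sbw_sent_ner : List String) (aligned_ids : List Int) : Decidable (Pre_sbwner2ner sbw_sent_ner aligned_ids) := by unfold Pre_sbwner2ner; infer_instance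

def pvWitness_sbwner2ner : List String × List Int := (["B-X", "I-X", "O"], [0, 0, 1])

def Spec_sbwner2ner (sbw_sent_ner : List String) (aligned_ids : List Int) (out : List String) : Prop := out = sbwner2ner_alt sbw_sent_ner aligned_ids
instance (sbw_sent_ner : List String) (aligned_ids : List Int) (out : List String) : Decidable (Spec_sbwner2ner sbw_sent_ner aligned_ids out) := by unfold Spec_sbwner2ner; infer_instance

-- ===== CLAIM (what is proved, stated in full; the proofs are below) =====
def Claim_equal_sbwner2ner : Prop := ∀ (sbw_sent_ner : List String) (aligned_ids : List Int), Dom_sbwner2ner sbw_sent_ner aligned_ids → Pre_sbwner2ner sbw_sent_ner aligned_ids → Spec_sbwner2ner sbw_sent_ner aligned_ids (sbwner2ner sbw_sent_ner aligned_ids)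

-- ===== LEMMAS AND PROOFS =====

/-- A's selection rule, restated on the zipped list with the previous id as state. -/
def keepNe (prev : Int) : List (String × Int) → List String
  | [] => []
  | (t, g) :: rest => (if g ≠ prev then [t] else []) ++ keepNe g rest

theorem keepNe_eq_loopB_dropWhile (l : List (String × Int)) :
    ∀ g : Int, keepNe g l = sbwner2nerLoopB (l.dropWhile (fun p => p.2 == g)) := by
  induction l with
  | nil => intro g; simp [keepNe, sbwner2nerLoopB]
  | cons p rest ih =>
      intro g
      obtain ⟨t, h⟩ := p
      by_cases hg : h = g
      · subst hg
        simp [keepNe, List.dropWhile, ih h]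
      · simp only [keepNe, List.dropWhile, show ((h == g) = false) by simp [hg]]
        simp [hg, sbwner2nerLoopB, ih h]

theorem loopB_cons (t : String) (g : Int) (zs : List (String × Int)) :
    sbwner2nerLoopB ((t, g) :: zs) = t :: keepNe g zs := by
  rw [sbwner2nerLoopB, keepNe_eq_loopB_dropWhile]

theorem loopA_invariant (al : List Int) (rest : List String) :
    ∀ (i : Nat) (acc : List String), 1 ≤ i → i + rest.length ≤ al.length →
    sbwner2nerLoopA al rest (i : Int) acc
      = acc ++ keepNe (al.getD (i - 1) 0) (rest.zip (al.drop i)) := by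
  induction rest with
  | nil => intro i acc _ _; simp [sbwner2nerLoopA, keepNe]
  | cons t rest ih =>
      intro i acc hi hlen
      have hiR : i < al.length := by simp at hlen; omega
      have hdrop : al.drop i = al[i] :: al.drop (i + 1) := List.drop_eq_getElem_cons hiR
      have h1 : PySem.List.pyGetD al (i : Int) 0 = al[i] := by
        rw [PySem.List.pyGetD_natCast]; exact List.getD_eq_getElem al 0 hiR
      have h2 : PySem.List.pyGetD al ((i : Int) - 1) 0 = al.getD (i - 1) 0 := by
        have : ((i : Int) - 1) = ((i - 1 : Nat) : Int) := by omega
        rw [this, PySem.List.pyGetD_natCast]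
      have hpos : (0 : Int) < (i : Int) := by exact_mod_cast hi
      have hpos : ((i : Int) > 0) := by exact_mod_cast hi
      have hstep : ((i : Int) + 1) = ((i + 1 : Nat) : Int) := by push_cast; ring
      have hget : al.getD (i + 1 - 1) 0 = al[i] := by
        simp only [Nat.add_sub_cancel]; exact List.getD_eq_getElem al 0 hiR
      rw [sbwner2nerLoopA, if_pos hpos, h1, h2, hstep,
        ih (i + 1) _ (by omega) (by simp at hlen ⊢; omega), hdrop]
      simp only [List.zip_cons_cons, keepNe, hget]
      split_ifs <;> simp

theorem sbwner2ner_spec : Claim_equal_sbwner2ner := by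
  intro sbw al _ hpre
  unfold Spec_sbwner2ner sbwner2ner sbwner2ner_alt
  match sbw, hpre with
  | [], _ => simp [sbwner2nerLoopA]
  | [t], _ => simp [sbwner2nerLoopA]
  | t1 :: t2 :: rest, hpre =>
      have hlen : (t1 :: t2 :: rest).length ≤ al.length := by
        rcases hpre with h | h
        · simp at h
        · exact h
      match al, hlen with
      | a0 :: al', hlen =>
          rw [sbwner2nerLoopA]
          simp only [show ((0 : Int) > 0) = False by simp, if_false, List.nil_append]
          rw [show ((0 : Int) + 1) = ((1 : Nat) : Int) by norm_num]
          rw [loopA_invariant (a0 :: al') (t2 :: rest) 1 [t1] (by omega)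
                (by simp at hlen ⊢; omega)]
          simp only [List.zip_cons_cons, List.drop_one, List.tail_cons]
          rw [if_neg (by simp), loopB_cons]
          simp
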